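-- pv_equiv track=rewrite | github.com/MPaizante/Python2024.1 | Test.py | elementos_repetidos
-- ===== SOURCE A (Python) =====
-- def elementos_repetidos(sequencia):
--     repetidos = set()
--     elementos_vistos = set()
--
--     for elemento in sequencia:
--         if elemento in elementos_vistos:
--             repetidos.add(elemento)
--         else:
--             elementos_vistos.add(elemento)
--
--     return sorted(list(repetidos))
-- ===== SOURCE B (Python) =====
-- def elementos_repetidos(sequencia):
--     contagem = {}
--     for x in sequencia:
--         contagem[x] = contagem.get(x, 0) + 1
--     return sorted(x for x, c in contagem.items() if c > 1)
-- ===== Notes on version B (the rewrite author's own statement) =====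
-- stated objective: idiomatic
-- what changed: Replaces the two running sets and per-element if/else branch with a count-all-then-filter decomposition: one pass builds a frequency dict, then the result is sorted(x for x,c in items if c>1).
import Mathlib
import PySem

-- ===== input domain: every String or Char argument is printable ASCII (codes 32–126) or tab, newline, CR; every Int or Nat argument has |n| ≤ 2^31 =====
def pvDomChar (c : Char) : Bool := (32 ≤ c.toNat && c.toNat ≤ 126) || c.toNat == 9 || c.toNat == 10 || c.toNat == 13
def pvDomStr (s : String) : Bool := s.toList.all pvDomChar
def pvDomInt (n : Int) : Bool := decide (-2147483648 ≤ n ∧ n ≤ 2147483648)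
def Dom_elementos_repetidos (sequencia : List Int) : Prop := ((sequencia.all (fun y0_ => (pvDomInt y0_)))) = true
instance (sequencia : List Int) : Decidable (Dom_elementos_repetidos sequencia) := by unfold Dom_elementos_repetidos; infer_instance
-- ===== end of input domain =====

-- B replaces A's two running sets with a count-then-filter decomposition (idiomatic; same cost).


-- ===== PORT A =====
def elementos_repetidos (sequencia : List Int) : List Int :=
  let st := sequencia.foldl
    (fun (s : PySem.Set Int × PySem.Set Int) elemento =>
      if PySem.Set.contains s.2 elemento then (PySem.Set.add s.1 elemento, s.2)
      else (s.1, PySem.Set.add s.2 elemento))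
    (PySem.Set.empty, PySem.Set.empty)
  PySem.List.sorted st.1 (fun x => x) false

-- ===== PORT B =====
def elementos_repetidos_alt (sequencia : List Int) : List Int :=
  let contagem : PySem.Dict Int Int :=
    sequencia.foldl (fun d x => d.insert x (d.getD x 0 + 1)) PySem.Dict.empty
  PySem.List.sorted ((contagem.items.filter (fun p => 1 < p.2)).map (·.1)) (fun x => x) false

-- ===== PRECONDITION & SPEC =====
def Spec_elementos_repetidos (sequencia : List Int) (out : List Int) : Prop := out = elementos_repetidos_alt sequencia
instance (sequencia : List Int) (out : List Int) : Decidable (Spec_elementos_repetidos sequencia out) := by unfold Spec_elementos_repetidos; infer_instance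

-- ===== CLAIM (what is proved, stated in full; the proofs are below) =====
def Claim_equal_elementos_repetidos : Prop := ∀ (sequencia : List Int), Dom_elementos_repetidos sequencia → Spec_elementos_repetidos sequencia (elementos_repetidos sequencia)

-- ===== LEMMAS AND PROOFS =====

-- A's loop invariant: the running 'repetidos' set stays Nodup and its final membership is
-- "already in rep, or occurs in xs and was either already seen or occurs at least twice in xs".
theorem repA_fold_spec (xs : List Int) (rep vis : PySem.Set Int) (hrep : rep.Nodup) :
    (xs.foldl
      (fun (s : PySem.Set Int × PySem.Set Int) e =>
        if PySem.Set.contains s.2 e then (PySem.Set.add s.1 e, s.2)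
        else (s.1, PySem.Set.add s.2 e)) (rep, vis)).1.Nodup ∧
    ∀ y, y ∈ (xs.foldl
      (fun (s : PySem.Set Int × PySem.Set Int) e =>
        if PySem.Set.contains s.2 e then (PySem.Set.add s.1 e, s.2)
        else (s.1, PySem.Set.add s.2 e)) (rep, vis)).1 ↔
      y ∈ rep ∨ (y ∈ xs ∧ (y ∈ vis ∨ 2 ≤ xs.count y)) := by
  induction xs generalizing rep vis with
  | nil => exact ⟨hrep, by simp⟩
  | cons x t ih =>
    simp only [List.foldl_cons]
    by_cases hx : x ∈ vis
    · have hc : PySem.Set.contains vis x = true := (PySem.Set.contains_iff vis x).mpr hx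
      simp only [hc, if_pos]
      obtain ⟨h1, h2⟩ := ih (PySem.Set.add rep x) vis (PySem.Set.nodup_add rep x hrep)
      refine ⟨h1, fun y => ?_⟩
      rw [h2 y]
      by_cases hyx : y = x
      · subst hyx
        simp [PySem.Set.mem_add, hx]
      · simp [PySem.Set.mem_add, hyx, show ¬x = y from fun h => hyx h.symm]
    · have hc : PySem.Set.contains vis x = false := by
        by_contra h
        exact hx ((PySem.Set.contains_iff vis x).mp (by simpa using h))
      simp only [hc, if_neg, Bool.false_eq_true, not_false_iff]
      obtain ⟨h1, h2⟩ := ih rep (PySem.Set.add vis x) hrep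
      refine ⟨h1, fun y => ?_⟩
      rw [h2 y]
      by_cases hyx : y = x
      · subst hyx
        constructor
        · rintro (h | ⟨ht, hv⟩)
          · exact Or.inl h
          · rcases hv with hv | hcnt
            · rcases (PySem.Set.mem_add _ _ _).mp hv with hv' | _
              · exact absurd hv' hx
              · refine Or.inr ⟨List.mem_cons_self, Or.inr ?_⟩
                have h1t : 1 ≤ t.count y := List.count_pos_iff.mpr ht
                rw [List.count_cons_self]
                omega
            · refine Or.inr ⟨List.mem_cons_self, Or.inr ?_⟩
              rw [List.count_cons_self]; omega
        · rintro (h | ⟨_, hv⟩)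
          · exact Or.inl h
          · rcases hv with hv | hcnt
            · exact absurd hv hx
            · have hcnt' : 1 ≤ t.count y := by
                rw [List.count_cons_self] at hcnt; omega
              exact Or.inr ⟨List.count_pos_iff.mp hcnt', Or.inl ((PySem.Set.mem_add _ _ _).mpr (Or.inr rfl))⟩
      · constructor
        · rintro (h | ⟨ht, hv⟩)
          · exact Or.inl h
          · rcases hv with hv | hcnt
            · rcases (PySem.Set.mem_add _ _ _).mp hv with hv' | h'
              · exact Or.inr ⟨List.mem_cons_of_mem _ ht, Or.inl hv'⟩
              · exact absurd h' hyx
            · exact Or.inr ⟨List.mem_cons_of_mem _ ht,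
                Or.inr (by simp [show ¬x = y from fun h => hyx h.symm] at hcnt ⊢; omega)⟩
        · rintro (h | ⟨ht, hv⟩)
          · exact Or.inl h
          · have ht' : y ∈ t := by
              rcases List.mem_cons.mp ht with h' | h'
              · exact absurd h' hyx
              · exact h'
            rcases hv with hv | hcnt
            · exact Or.inr ⟨ht', Or.inl ((PySem.Set.mem_add _ _ _).mpr (Or.inl hv))⟩
            · exact Or.inr ⟨ht', Or.inr (by simp [show ¬x = y from fun h => hyx h.symm] at hcnt ⊢; omega)⟩

-- B's pre-sort list is the duplicate-filter of the first-occurrence dedup of xs.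
theorem repB_list_eq (xs : List Int) :
    (((xs.foldl (fun (d : PySem.Dict Int Int) x => d.insert x (d.getD x 0 + 1))
        PySem.Dict.empty).items.filter (fun p => 1 < p.2)).map (·.1)) =
    (PySem.Set.ofList xs).filter (fun y => decide (1 < (xs.count y : Int))) := by
  rw [PySem.Dict.foldl_insert_getD_add_one_eq_counter, PySem.Dict.items_counter]
  rw [List.filter_map, List.map_map]
  simp [Function.comp_def]

theorem elementos_repetidos_eq (sequencia : List Int) :
    elementos_repetidos sequencia = elementos_repetidos_alt sequencia := by
  unfold elementos_repetidos elementos_repetidos_alt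
  simp only
  rw [repB_list_eq]
  obtain ⟨hnd, hmem⟩ := repA_fold_spec sequencia PySem.Set.empty PySem.Set.empty List.nodup_nil
  apply PySem.List.sorted_eq_sorted_of_perm _ _ _ (fun a b h => h)
  apply (List.perm_ext_iff_of_nodup hnd
    (List.Nodup.filter _ (PySem.Set.nodup_ofList sequencia))).mpr
  intro y
  rw [hmem y, List.mem_filter, PySem.Set.mem_ofList]
  constructor
  · rintro (h | ⟨hx, hv | hc⟩)
    · exact absurd h (List.not_mem_nil)
    · exact absurd hv (List.not_mem_nil)
    · exact ⟨hx, by simp; exact_mod_cast hc⟩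
  · rintro ⟨hx, hc⟩
    refine Or.inr ⟨hx, Or.inr ?_⟩
    simp at hc
    exact_mod_cast hc

-- ===== VERDICT (by name: the statement is the Claim_ definition above) =====
theorem elementos_repetidos_spec : Claim_equal_elementos_repetidos := by
  intro sequencia _
  exact elementos_repetidos_eq sequencia
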